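-- pv_equiv track=rewrite | github.com/Xiangyu-CAS/AICity2020-VOC-ReID | tools/aicity20/eval_by_distmat.py | results_to_track
-- ===== SOURCE A (Python) =====
-- def results_to_track(results, tracks, topk=100):
--     m, n = len(results), len(results[0])
--     lookup_map = {}
--     for i, track in enumerate(tracks):
--         for img_id in track:
--             lookup_map[img_id] = i
--     reranked_results = []
--     for i in range(m):
--         used_track_id = set()
--         reranked_result = []
--         for j in range(n):
--             track_id = lookup_map[results[i][j]]
--             if track_id in used_track_id:
--                 continue
--             used_track_id.add(track_id)
--             reranked_result.extend(tracks[track_id])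
--         reranked_results.append(reranked_result[:topk])
--     return reranked_results
-- ===== SOURCE B (Python) =====
-- def results_to_track(results, tracks, topk=100):
--     n = len(results[0])
--     lookup_map = {}
--     for i, track in enumerate(tracks):
--         for img_id in track:
--             lookup_map[img_id] = i
--     reranked_results = []
--     for row in results:
--         # map each track id to its FIRST position in the row: walk the row
--         # backwards and let later (smaller-j) writes overwrite earlier ones,
--         # so no membership test / dedup is needed at all
--         first = {}
--         for j in range(n - 1, -1, -1):
--             first[lookup_map[row[j]]] = j
--         # order track ids by that first position, then flatten and truncate
--         order = sorted(first, key=first.get)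
--         reranked_results.append([x for t in order for x in tracks[t]][:topk])
--     return reranked_results
-- ===== Notes on version B (the rewrite author's own statement) =====
-- stated objective: alternative
-- what changed: Instead of A's single interleaved dedup-and-extend pass (seen-set membership test, continue, extend), B walks each row backwards overwriting a dict so it ends up holding every track id's first row position with no membership test at all, then SORTS the track ids by that first position and flattens their tracks, truncating once; Pre_ excludes only inputs where A raises (empty results / short rows -> IndexError, an image id in no track -> KeyError), where B raises too.
import Mathlib
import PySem

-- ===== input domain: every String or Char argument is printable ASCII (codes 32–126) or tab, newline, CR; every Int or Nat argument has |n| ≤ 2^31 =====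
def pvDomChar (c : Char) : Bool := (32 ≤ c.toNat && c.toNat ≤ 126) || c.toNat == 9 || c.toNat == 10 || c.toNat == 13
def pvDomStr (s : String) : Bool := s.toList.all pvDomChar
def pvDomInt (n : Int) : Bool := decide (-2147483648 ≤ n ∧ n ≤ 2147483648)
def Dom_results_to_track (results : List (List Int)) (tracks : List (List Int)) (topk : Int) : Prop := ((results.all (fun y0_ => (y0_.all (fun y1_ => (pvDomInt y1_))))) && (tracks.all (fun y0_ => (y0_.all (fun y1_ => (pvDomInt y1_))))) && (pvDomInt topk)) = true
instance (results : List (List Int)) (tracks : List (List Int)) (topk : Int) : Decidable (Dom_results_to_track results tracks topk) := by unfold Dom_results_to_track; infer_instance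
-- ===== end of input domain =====

-- B replaces A's interleaved membership-test/extend dedup loop by a sort-based row pass:
-- a backward overwrite records each track id's FIRST row position (no membership test),
-- the ids are sorted by that position, then flattened and truncated; objective: alternative.

-- ===== PORT A =====
-- pyGetD/Dict.getD defaults stand for IndexError/KeyError sites; Pre_ excludes them.
def results_to_track (results : List (List Int)) (tracks : List (List Int)) (topk : Int) : List (List Int) :=
  let n : Int := PySem.List.len (results.headD [])
  let m : Int := PySem.List.len results
  let lookup : PySem.Dict Int Int :=
    (PySem.List.enumerate tracks 0).foldl
      (fun d p => p.2.foldl (fun d imgId => d.insert imgId p.1) d) PySem.Dict.empty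
  (PySem.List.pyRange 0 m 1).foldl (fun reranked i =>
    let row := PySem.List.pyGetD results i []
    let st := (PySem.List.pyRange 0 n 1).foldl
      (fun (st : PySem.Set Int × List Int) j =>
        let tid := lookup.getD (PySem.List.pyGetD row j 0) 0
        if PySem.Set.contains st.1 tid then st
        else (PySem.Set.add st.1 tid, st.2 ++ PySem.List.pyGetD tracks tid []))
      (PySem.Set.empty, [])
    reranked ++ [PySem.List.slice st.2 none (some topk)]) []

-- ===== PORT B =====
-- 'sorted(first, key=first.get)' sorts first's keys; first.get k is ported as getD k 0
-- (every sorted key is a key of first, so the default is never read).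
def results_to_track_alt (results : List (List Int)) (tracks : List (List Int)) (topk : Int) : List (List Int) :=
  let n : Int := PySem.List.len (results.headD [])
  let lookup : PySem.Dict Int Int :=
    (PySem.List.enumerate tracks 0).foldl
      (fun d p => p.2.foldl (fun d imgId => d.insert imgId p.1) d) PySem.Dict.empty
  results.map (fun row =>
    let first : PySem.Dict Int Int :=
      (PySem.List.pyRange (n - 1) (-1) (-1)).foldl
        (fun d j => d.insert (lookup.getD (PySem.List.pyGetD row j 0) 0) j) PySem.Dict.empty
    let order := PySem.List.sorted first.keys (fun k => first.getD k 0)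
    PySem.List.slice (order.flatMap (fun t => PySem.List.pyGetD tracks t [])) none (some topk))

-- ===== PRECONDITION & SPEC =====
-- Pre_ = exactly where Python A returns: results nonempty (else IndexError at results[0]),
-- every row at least as long as the first (else IndexError at results[i][j]), and every
-- accessed image id occurring in some track (else KeyError in lookup_map).
def Pre_results_to_track (results : List (List Int)) (tracks : List (List Int)) (topk : Int) : Prop :=
  results ≠ [] ∧ ∀ row ∈ results, (results.headD []).length ≤ row.length ∧
    ∀ j : Nat, j < (results.headD []).length → row.getD j 0 ∈ tracks.flatten
instance (results : List (List Int)) (tracks : List (List Int)) (topk : Int) : Decidable (Pre_results_to_track results tracks topk) := by unfold Pre_results_to_track; infer_instance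

def pvWitness_results_to_track : List (List Int) × List (List Int) × Int := ([[1, 2]], [[2, 3], [1]], 3)

def Spec_results_to_track (results : List (List Int)) (tracks : List (List Int)) (topk : Int) (out : List (List Int)) : Prop := out = results_to_track_alt results tracks topk
instance (results : List (List Int)) (tracks : List (List Int)) (topk : Int) (out : List (List Int)) : Decidable (Spec_results_to_track results tracks topk out) := by unfold Spec_results_to_track; infer_instance

-- ===== CLAIM (what is proved, stated in full; the proofs are below) =====
def Claim_equal_results_to_track : Prop := ∀ (results : List (List Int)) (tracks : List (List Int)) (topk : Int), Dom_results_to_track results tracks topk → Pre_results_to_track results tracks topk → Spec_results_to_track results tracks topk (results_to_track results tracks topk)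

-- ===== LEMMAS AND PROOFS =====

theorem pvMemOfContains {α : Type} [DecidableEq α] {s : List α} {x : α}
    (h : PySem.Set.contains s x = true) : x ∈ s := by
  simpa [PySem.Set.contains] using h

theorem pvNotMemOfNotContains {α : Type} [DecidableEq α] {s : List α} {x : α}
    (h : ¬ PySem.Set.contains s x = true) : x ∉ s := by
  simpa [PySem.Set.contains] using h

-- PySem.Set.update keeps the start as a prefix.
theorem pvUpdatePrefix {α : Type} [DecidableEq α] (l s : List α) :
    ∃ u, PySem.Set.update s l = s ++ u := by
  induction l generalizing s with
  | nil => exact ⟨[], by simp [PySem.Set.update]⟩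
  | cons x l ih =>
    obtain ⟨u, hu⟩ := ih (PySem.Set.add s x)
    by_cases h : PySem.Set.contains s x = true
    · exact ⟨u, by simpa [PySem.Set.update, PySem.Set.add, pvMemOfContains h] using hu⟩
    · refine ⟨x :: u, ?_⟩
      have hadd : PySem.Set.add s x = s ++ [x] := by
        simp [PySem.Set.add, pvNotMemOfNotContains h]
      simp only [PySem.Set.update, List.foldl_cons] at hu ⊢
      rw [hu, hadd, List.append_assoc]
      rfl

-- A's interleaved dedup/extend fold, characterised: the set component is Set.update,
-- the list component appends the tracks of the freshly seen ids.
theorem pvInnerFold (T : Int → List Int) (ids : List Int) :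
    ∀ (s acc : List Int),
      ids.foldl (fun (st : PySem.Set Int × List Int) tid =>
          if PySem.Set.contains st.1 tid then st
          else (PySem.Set.add st.1 tid, st.2 ++ T tid)) (s, acc)
      = (PySem.Set.update s ids,
         acc ++ ((PySem.Set.update s ids).drop s.length).flatMap T) := by
  induction ids with
  | nil => intro s acc; simp [PySem.Set.update]
  | cons t rest ih =>
    intro s acc
    simp only [List.foldl_cons]
    by_cases h : PySem.Set.contains s t = true
    · have hadd : PySem.Set.add s t = s := by
        simp [PySem.Set.add, pvMemOfContains h]
      rw [if_pos h, ih s acc]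
      simp [PySem.Set.update, hadd]
    · have hadd : PySem.Set.add s t = s ++ [t] := by
        simp [PySem.Set.add, pvNotMemOfNotContains h]
      rw [if_neg h, ih (PySem.Set.add s t) (acc ++ T t)]
      obtain ⟨u, hu⟩ := pvUpdatePrefix rest (PySem.Set.add s t)
      have hup : PySem.Set.update s (t :: rest) = PySem.Set.update (PySem.Set.add s t) rest := by
        simp [PySem.Set.update]
      rw [hup, hu, hadd]
      have h1 : List.drop s.length ((s ++ [t]) ++ u) = t :: u := by
        rw [List.append_assoc]; exact List.drop_left
      have h2 : List.drop (s ++ [t]).length ((s ++ [t]) ++ u) = u := List.drop_left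
      rw [h1, h2]
      simp [List.flatMap_cons, List.append_assoc]

-- Set.update over xs appends exactly the fresh elements of xs, in first-occurrence order.
theorem pvUpdateFilter (xs : List Int) :
    ∀ (s : List Int), PySem.Set.update s xs
      = s ++ (PySem.Set.ofList xs).filter (fun y => !PySem.Set.contains s y) := by
  induction xs with
  | nil => intro s; simp [PySem.Set.update, PySem.Set.ofList]
  | cons x xs ih =>
    intro s
    have hof : PySem.Set.ofList (x :: xs) = PySem.Set.update [x] xs := by
      simp [PySem.Set.ofList_eq_foldl, PySem.Set.update_eq_foldl, PySem.Set.add,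
        PySem.Set.contains]
    have hstep : PySem.Set.update s (x :: xs) = PySem.Set.update (PySem.Set.add s x) xs := by
      simp [PySem.Set.update_eq_foldl]
    rw [hstep, ih, hof, ih, List.filter_append, List.filter_filter]
    by_cases h : x ∈ s
    · have hadd : PySem.Set.add s x = s := by
        simp [PySem.Set.add, PySem.Set.contains, h]
      have hx : ([x].filter (fun y => !PySem.Set.contains s y)) = [] := by
        simp [PySem.Set.contains, h]
      rw [hadd, hx, List.nil_append]
      congr 1
      apply List.filter_congr
      intro y _
      by_cases hyx : y = x <;> simp [PySem.Set.contains, hyx, h]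
    · have hadd : PySem.Set.add s x = s ++ [x] := by
        simp [PySem.Set.add, PySem.Set.contains, h]
      have hx : ([x].filter (fun y => !PySem.Set.contains s y)) = [x] := by
        simp [PySem.Set.contains, h]
      rw [hadd, hx, List.append_assoc]
      congr 2
      apply List.filter_congr
      intro y _
      by_cases hyx : y = x <;> simp [PySem.Set.contains, hyx, h]

-- Ordered dedup, one step: set-of-list of (x :: xs) is x then the other elements.
theorem pvOfListCons (x : Int) (xs : List Int) :
    PySem.Set.ofList (x :: xs) = x :: (PySem.Set.ofList xs).filter (fun y => !(y == x)) := by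
  have h : PySem.Set.ofList (x :: xs) = PySem.Set.update [x] xs := by
    simp [PySem.Set.ofList_eq_foldl, PySem.Set.update_eq_foldl, PySem.Set.add, PySem.Set.contains]
  rw [h, pvUpdateFilter xs [x]]
  simp only [PySem.Set.contains, List.cons_append, List.nil_append]
  congr 1
  apply List.filter_congr
  intro y _
  by_cases hyx : y = x <;> simp [hyx]

-- In the ordered dedup of tids, first-occurrence indices strictly increase.
theorem pvPairwiseIdxOf (tids : List Int) :
    (PySem.Set.ofList tids).Pairwise (fun a b => tids.idxOf a < tids.idxOf b) := by
  induction tids with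
  | nil => simp [PySem.Set.ofList]
  | cons x xs ih =>
    rw [pvOfListCons]
    refine List.pairwise_cons.2 ⟨?_, ?_⟩
    · intro b hb
      have hbx : b ≠ x := by simpa using (List.mem_filter.1 hb).2
      simp [Ne.symm hbx]
    · refine (ih.filter _).imp_of_mem ?_
      intro a b ha hb hab
      have hax : a ≠ x := by simpa using (List.mem_filter.1 ha).2
      have hbx : b ≠ x := by simpa using (List.mem_filter.1 hb).2
      simp only [List.idxOf_cons]
      have h1 : (x == a) = false := by simp [Ne.symm hax]
      have h2 : (x == b) = false := by simp [Ne.symm hbx]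
      simp [h1, h2]
      omega

-- Folding insert (f j, j) over l: get? k is the LAST j of l with f j = k.
theorem pvFoldInsertGet (l : List Int) (f : Int → Int) :
    ∀ (d : PySem.Dict Int Int) (k : Int),
      (l.foldl (fun d j => d.insert (f j) j) d).get? k
        = (l.reverse.find? (fun j => f j == k)).or (d.get? k) := by
  induction l with
  | nil => intro d k; simp
  | cons j l ih =>
    intro d k
    simp only [List.foldl_cons, List.reverse_cons]
    rw [ih, List.find?_append, Option.or_assoc]
    congr 1
    rw [PySem.Dict.get?_insert]
    by_cases h : f j = k
    · simp [h]
    · have h2 : ¬ k = f j := fun e => h e.symm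
      have h3 : (f j == k) = false := by simp [h]
      simp [h2, h3]

-- find? of the witness equals indexing at the first-occurrence position of its image.
theorem pvFindIdx (js : List Int) (f : Int → Int) (k : Int) :
    js.find? (fun j => f j == k) = js[(js.map f).idxOf k]? := by
  induction js with
  | nil => simp
  | cons j js ih =>
    by_cases h : f j = k
    · simp [List.find?, h]
    · have hb : (f j == k) = false := by simp [h]
      simp [List.find?, hb, List.idxOf_cons, ih]

-- The per-row equality: A's interleaved dedup-and-extend pass equals B's
-- backward-overwrite + sort-by-first-position + flatten pass.
theorem pvRowEq (g : Int → Int) (T : Int → List Int) (n topk : Int) :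
    PySem.List.slice
      (((PySem.List.pyRange 0 n 1).foldl
        (fun (st : PySem.Set Int × List Int) j =>
          if PySem.Set.contains st.1 (g j) then st
          else (PySem.Set.add st.1 (g j), st.2 ++ T (g j)))
        (PySem.Set.empty, [])).2) none (some topk)
    = PySem.List.slice
        ((PySem.List.sorted
            ((PySem.List.pyRange (n - 1) (-1) (-1)).foldl
              (fun d j => d.insert (g j) j) (PySem.Dict.empty : PySem.Dict Int Int)).keys
            (fun k => ((PySem.List.pyRange (n - 1) (-1) (-1)).foldl
              (fun d j => d.insert (g j) j) (PySem.Dict.empty : PySem.Dict Int Int)).getD k 0)).flatMap T)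
        none (some topk) := by
  set R := PySem.List.pyRange 0 n 1 with hR
  set tids := R.map g with htids
  set first := (PySem.List.pyRange (n - 1) (-1) (-1)).foldl
      (fun d j => d.insert (g j) j) (PySem.Dict.empty : PySem.Dict Int Int) with hfirst
  -- A's side: the fold produces the tracks of the deduped tids, in first-occurrence order
  have hA : ((R.foldl
      (fun (st : PySem.Set Int × List Int) j =>
        if PySem.Set.contains st.1 (g j) then st
        else (PySem.Set.add st.1 (g j), st.2 ++ T (g j)))
      (PySem.Set.empty, [])).2) = (PySem.Set.ofList tids).flatMap T := by
    have := pvInnerFold T tids PySem.Set.empty []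
    rw [htids, List.foldl_map] at this
    rw [this]
    simp only [PySem.Set.empty, PySem.Set.update_eq_foldl, PySem.Set.ofList_eq_foldl,
      List.length_nil, List.drop_zero, List.nil_append]
    rfl
  -- the backward range is R reversed
  have hrev : PySem.List.pyRange (n - 1) (-1) (-1) = R.reverse := by
    rw [PySem.List.pyRange_neg_one_eq_reverse]
    norm_num [hR]
  -- first's lookup: the first j in R with g j = k
  have hget : ∀ k, first.get? k = R.find? (fun j => g j == k) := by
    intro k
    rw [hfirst, hrev, pvFoldInsertGet, List.reverse_reverse]
    simp
  -- first's keys are the distinct tids (in reversed-first-occurrence order)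
  have hkeys : first.keys = PySem.Set.ofList tids.reverse := by
    rw [hfirst, PySem.Dict.keys_foldl_insert_key (f := fun _ j => j), hrev]
    simp [htids, PySem.Set.ofList_eq_foldl, PySem.Set.update_eq_foldl, List.map_reverse]
  -- the key of a first-seen tid is its first-occurrence position
  have hlen : tids.length = (n - 0).toNat := by
    simp [htids, hR, PySem.List.length_pyRange_one]
  have hkey : ∀ k ∈ tids, first.getD k 0 = (tids.idxOf k : Int) := by
    intro k hk
    have hidx : tids.idxOf k < (n - 0).toNat := hlen ▸ List.idxOf_lt_length_of_mem hk
    have : first.get? k = some (0 + (tids.idxOf k : Int)) := by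
      rw [hget k, pvFindIdx R g k, ← htids, hR, PySem.List.getElem?_pyRange_one, if_pos hidx]
    simp [PySem.Dict.getD, this]
  -- hence sorting first's keys by first position restores the dedup order
  have hsorted : PySem.List.sorted first.keys (fun k => first.getD k 0)
      = PySem.Set.ofList tids := by
    apply PySem.List.sorted_eq_of_perm_of_pairwise_lt
    · rw [hkeys]
      refine (List.perm_ext_iff_of_nodup (PySem.Set.nodup_ofList _)
        (PySem.Set.nodup_ofList _)).2 ?_
      intro a
      simp [PySem.Set.mem_ofList]
    · refine (pvPairwiseIdxOf tids).imp_of_mem ?_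
      intro a b ha hb hab
      have ha' : a ∈ tids := (PySem.Set.mem_ofList tids a).1 ha
      have hb' : b ∈ tids := (PySem.Set.mem_ofList tids b).1 hb
      rw [hkey a ha', hkey b hb']
      exact_mod_cast hab
  rw [hA, hsorted]

-- ===== VERDICT (by name: the statement is the Claim_ definition above) =====
set_option maxHeartbeats 1000000 in
theorem results_to_track_spec : Claim_equal_results_to_track := by
  intro results tracks topk _ _
  unfold Spec_results_to_track results_to_track results_to_track_alt
  rw [PySem.List.foldl_append_singleton_eq_map]
  simp only [PySem.List.len_eq]
  generalize ((results.headD []).length : Int) = N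
  conv_rhs => rw [← PySem.List.map_pyGetD_pyRange_zero results ([] : List Int), List.map_map]
  refine List.map_congr_left (fun i _ => ?_)
  simp only [Function.comp]
  rw [pvRowEq
    (fun j => (((PySem.List.enumerate tracks 0).foldl
        (fun d p => p.2.foldl (fun d imgId => d.insert imgId p.1) d) PySem.Dict.empty).getD
        (PySem.List.pyGetD (PySem.List.pyGetD results i []) j 0) 0))
    (fun tid => PySem.List.pyGetD tracks tid []) N topk]
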